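-- pv_equiv track=rewrite | github.com/Arshiya109/PashuSwasthyaAI-A-Smart-AI-based-Disease-Diagnosis-System-for-Cattles-and-Goats | PashuSwasthyaAI/PashuSwastyaAI modules/Symptom_pred_model.py | extract_all_animal_subtypes_from_dataset
-- ===== SOURCE A (Python) =====
-- def extract_all_animal_subtypes_from_dataset(records):
--     """Extract all unique animal types and subtypes from the dataset"""
--     animal_mapping = {}
--     for record in records:
--         animal_type = record.get("Animal_Type", "")
--         sub_type = record.get("Sub_Type", "")
--         if animal_type:
--             if animal_type not in animal_mapping:
--                 animal_mapping[animal_type] = set()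
--             if sub_type:
--                 animal_mapping[animal_type].add(sub_type)
--
--     for key in animal_mapping:
--         animal_mapping[key] = sorted(list(animal_mapping[key]))
--
--     return animal_mapping
-- ===== SOURCE B (Python) =====
-- def extract_all_animal_subtypes_from_dataset(records):
--     """Extract all unique animal types and subtypes from the dataset"""
--     pairs = [(r.get("Animal_Type", ""), r.get("Sub_Type", "")) for r in records]
--     types = dict.fromkeys(a for a, _ in pairs if a)
--     return {a: sorted({s for t, s in pairs if t == a and s}) for a in types}
-- ===== Notes on version B (the rewrite author's own statement) =====
-- stated objective: alternative
-- what changed: A builds a dict of sets incrementally in one pass and then sorts each value in place; B instead projects records to (type, subtype) pairs, dedups the non-empty types, and builds each group as sorted(set(...)) with a per-type comprehension.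
import Mathlib
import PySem

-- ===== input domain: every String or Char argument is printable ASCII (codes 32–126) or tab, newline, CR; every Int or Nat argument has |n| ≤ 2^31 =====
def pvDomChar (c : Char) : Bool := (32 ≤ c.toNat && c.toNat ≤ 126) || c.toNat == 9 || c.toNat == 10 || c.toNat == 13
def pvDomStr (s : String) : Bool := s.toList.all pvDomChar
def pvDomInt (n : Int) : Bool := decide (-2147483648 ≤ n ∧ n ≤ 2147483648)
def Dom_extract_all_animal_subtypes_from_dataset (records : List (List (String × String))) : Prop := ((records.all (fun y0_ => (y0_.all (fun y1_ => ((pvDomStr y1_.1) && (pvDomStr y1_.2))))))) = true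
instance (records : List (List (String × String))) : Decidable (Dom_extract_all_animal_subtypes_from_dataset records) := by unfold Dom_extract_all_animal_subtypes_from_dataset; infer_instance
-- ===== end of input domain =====

-- B replaces A's incremental dict-of-sets with a two-phase pipeline (project to (type, subtype) pairs,
-- dedup the types, then build each group's sorted subtype set by a per-type comprehension); objective: alternative.

-- ===== PORT A =====
def pvStepA (m : PySem.Dict String (List String)) (record : List (String × String)) : PySem.Dict String (List String) :=
  let animal_type := (PySem.Dict.mk record).getD "Animal_Type" ""
  let sub_type := (PySem.Dict.mk record).getD "Sub_Type" ""
  if animal_type ≠ "" then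
    let m1 := if m.contains animal_type then m else m.insert animal_type PySem.Set.empty
    if sub_type ≠ "" then m1.modify animal_type PySem.Set.empty (fun s => PySem.Set.add s sub_type) else m1
  else m

def extract_all_animal_subtypes_from_dataset (records : List (List (String × String))) : List (String × List String) :=
  let animal_mapping := records.foldl pvStepA PySem.Dict.empty
  (animal_mapping.keys.foldl
    (fun d key => d.insert key (PySem.List.sorted (d.getD key PySem.Set.empty) (fun x => x) false))
    animal_mapping).items

-- ===== PORT B =====
def extract_all_animal_subtypes_from_dataset_alt (records : List (List (String × String))) : List (String × List String) :=
  let pairs := records.map (fun r => ((PySem.Dict.mk r).getD "Animal_Type" "", (PySem.Dict.mk r).getD "Sub_Type" ""))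
  let types := PySem.List.dedup ((pairs.filter (fun p => p.1 != "")).map Prod.fst)
  types.map (fun a =>
    (a, PySem.List.sorted
          (PySem.Set.ofList (((pairs.filter (fun p => p.1 == a && p.2 != "")).map Prod.snd)))
          (fun x => x) false))

-- ===== PRECONDITION & SPEC =====
def Spec_extract_all_animal_subtypes_from_dataset (records : List (List (String × String))) (out : List (String × List String)) : Prop := out = extract_all_animal_subtypes_from_dataset_alt records
instance (records : List (List (String × String))) (out : List (String × List String)) : Decidable (Spec_extract_all_animal_subtypes_from_dataset records out) := by unfold Spec_extract_all_animal_subtypes_from_dataset; infer_instance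

-- ===== CLAIM (what is proved, stated in full; the proofs are below) =====
def Claim_equal_extract_all_animal_subtypes_from_dataset : Prop := ∀ (records : List (List (String × String))), Dom_extract_all_animal_subtypes_from_dataset records → Spec_extract_all_animal_subtypes_from_dataset records (extract_all_animal_subtypes_from_dataset records)

-- ===== LEMMAS AND PROOFS =====

def pvPair (r : List (String × String)) : String × String :=
  ((PySem.Dict.mk r).getD "Animal_Type" "", (PySem.Dict.mk r).getD "Sub_Type" "")

def pvTypes (records : List (List (String × String))) : List String :=
  ((records.map pvPair).filter (fun p => p.1 != "")).map Prod.fst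

def pvSubs (records : List (List (String × String))) (a : String) : List String :=
  ((records.map pvPair).filter (fun p => p.1 == a && p.2 != "")).map Prod.snd

lemma pvUpdate_cons (s : List String) (x : String) (l : List String) :
    PySem.Set.update s (x :: l) = PySem.Set.update (PySem.Set.add s x) l := rfl

lemma pvKeys_foldA : ∀ (rs : List (List (String × String))) (m : PySem.Dict String (List String)),
    (rs.foldl pvStepA m).keys = PySem.Set.update m.keys (pvTypes rs) := by
  intro rs
  induction rs with
  | nil => intro m; simp [pvTypes, PySem.Set.update]
  | cons r rs ih =>
    intro m
    rw [List.foldl_cons, ih]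
    by_cases ha : (PySem.Dict.mk r).getD "Animal_Type" "" = ""
    · have hstep : pvStepA m r = m := by simp [pvStepA, ha]
      have htypes : pvTypes (r :: rs) = pvTypes rs := by
        simp [pvTypes, pvPair, ha]
      rw [hstep, htypes]
    · have htypes : pvTypes (r :: rs) = (PySem.Dict.mk r).getD "Animal_Type" "" :: pvTypes rs := by
        simp [pvTypes, pvPair, ha]
      have hkeys : (pvStepA m r).keys = PySem.Set.add m.keys ((PySem.Dict.mk r).getD "Animal_Type" "") := by
        by_cases hc : m.contains ((PySem.Dict.mk r).getD "Animal_Type" "") = true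
        · have hmem : (PySem.Dict.mk r).getD "Animal_Type" "" ∈ m.keys :=
            (PySem.Dict.contains_iff_mem_keys m _).mp hc
          have hadd : PySem.Set.add m.keys ((PySem.Dict.mk r).getD "Animal_Type" "") = m.keys := by
            simp [PySem.Set.add, hmem]
          by_cases hs : (PySem.Dict.mk r).getD "Sub_Type" "" = ""
          · have hstep : pvStepA m r = m := by simp [pvStepA, ha, hc, hs]
            rw [hstep, hadd]
          · have hstep : pvStepA m r
                = m.modify ((PySem.Dict.mk r).getD "Animal_Type" "") PySem.Set.empty
                    (fun s => PySem.Set.add s ((PySem.Dict.mk r).getD "Sub_Type" "")) := by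
              simp [pvStepA, ha, hc, hs]
            rw [hstep, PySem.Dict.keys_modify, PySem.Dict.keys_insert_of_contains m _ hc, hadd]
        · have hc' : m.contains ((PySem.Dict.mk r).getD "Animal_Type" "") = false := by
            simpa using hc
          have hmem : (PySem.Dict.mk r).getD "Animal_Type" "" ∉ m.keys := by
            intro hm; exact hc ((PySem.Dict.contains_iff_mem_keys m _).mpr hm)
          have hadd : PySem.Set.add m.keys ((PySem.Dict.mk r).getD "Animal_Type" "")
              = m.keys ++ [(PySem.Dict.mk r).getD "Animal_Type" ""] := by
            simp [PySem.Set.add, hmem]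
          have hkeys1 : (m.insert ((PySem.Dict.mk r).getD "Animal_Type" "") PySem.Set.empty).keys
              = m.keys ++ [(PySem.Dict.mk r).getD "Animal_Type" ""] :=
            PySem.Dict.keys_insert_of_not_contains m _ hc'
          by_cases hs : (PySem.Dict.mk r).getD "Sub_Type" "" = ""
          · have hstep : pvStepA m r
                = m.insert ((PySem.Dict.mk r).getD "Animal_Type" "") PySem.Set.empty := by
              simp [pvStepA, ha, hc', hs]
            rw [hstep, hkeys1, hadd]
          · have hstep : pvStepA m r
                = (m.insert ((PySem.Dict.mk r).getD "Animal_Type" "") PySem.Set.empty).modify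
                    ((PySem.Dict.mk r).getD "Animal_Type" "") PySem.Set.empty
                    (fun s => PySem.Set.add s ((PySem.Dict.mk r).getD "Sub_Type" "")) := by
              simp [pvStepA, ha, hc', hs]
            have hcont1 : (m.insert ((PySem.Dict.mk r).getD "Animal_Type" "") PySem.Set.empty).contains
                ((PySem.Dict.mk r).getD "Animal_Type" "") = true := by
              rw [PySem.Dict.contains_insert]; simp
            rw [hstep, PySem.Dict.keys_modify, PySem.Dict.keys_insert_of_contains _ _ hcont1,
              hkeys1, hadd]
      rw [htypes, hkeys, pvUpdate_cons]

lemma pvGetD_foldA : ∀ (rs : List (List (String × String))) (m : PySem.Dict String (List String)) (a : String),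
    a ≠ "" →
    (rs.foldl pvStepA m).getD a PySem.Set.empty
      = PySem.Set.update (m.getD a PySem.Set.empty) (pvSubs rs a) := by
  intro rs
  induction rs with
  | nil => intro m a _; simp [pvSubs, PySem.Set.update]
  | cons r rs ih =>
    intro m a hA
    rw [List.foldl_cons, ih _ _ hA]
    by_cases hb : (PySem.Dict.mk r).getD "Animal_Type" "" = ""
    · have hstep : pvStepA m r = m := by simp [pvStepA, hb]
      have hcond : ¬ ((PySem.Dict.mk r).getD "Animal_Type" "" = a) := by
        rw [hb]; exact fun h => hA h.symm
      have hsubs : pvSubs (r :: rs) a = pvSubs rs a := by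
        simp [pvSubs, pvPair, hcond]
      rw [hstep, hsubs]
    · by_cases hba : (PySem.Dict.mk r).getD "Animal_Type" "" = a
      · by_cases hs : (PySem.Dict.mk r).getD "Sub_Type" "" = ""
        · have hsubs : pvSubs (r :: rs) a = pvSubs rs a := by
            simp [pvSubs, pvPair, hs]
          by_cases hc : m.contains ((PySem.Dict.mk r).getD "Animal_Type" "") = true
          · have hstep : pvStepA m r = m := by simp [pvStepA, hb, hs, hc]
            rw [hstep, hsubs]
          · have hc' : m.contains ((PySem.Dict.mk r).getD "Animal_Type" "") = false := by simpa using hc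
            have hstep : pvStepA m r
                = m.insert ((PySem.Dict.mk r).getD "Animal_Type" "") PySem.Set.empty := by
              simp [pvStepA, hb, hs, hc']
            have hgd : (pvStepA m r).getD a PySem.Set.empty = m.getD a PySem.Set.empty := by
              rw [hstep, ← hba, PySem.Dict.getD_insert_self,
                PySem.Dict.getD_of_not_contains m _ hc']
            rw [hgd, hsubs]
        · have hsubs : pvSubs (r :: rs) a
              = (PySem.Dict.mk r).getD "Sub_Type" "" :: pvSubs rs a := by
            simp [pvSubs, pvPair, hba, hs]
          have hm1 : (if m.contains ((PySem.Dict.mk r).getD "Animal_Type" "") then m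
                else m.insert ((PySem.Dict.mk r).getD "Animal_Type" "") PySem.Set.empty).getD
                  ((PySem.Dict.mk r).getD "Animal_Type" "") PySem.Set.empty
              = m.getD ((PySem.Dict.mk r).getD "Animal_Type" "") PySem.Set.empty := by
            by_cases hc : m.contains ((PySem.Dict.mk r).getD "Animal_Type" "") = true
            · rw [if_pos hc]
            · have hc' : m.contains ((PySem.Dict.mk r).getD "Animal_Type" "") = false := by simpa using hc
              rw [if_neg (by simp [hc']), PySem.Dict.getD_insert_self,
                PySem.Dict.getD_of_not_contains m _ hc']
          have hstep : pvStepA m r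
              = (if m.contains ((PySem.Dict.mk r).getD "Animal_Type" "") then m
                 else m.insert ((PySem.Dict.mk r).getD "Animal_Type" "") PySem.Set.empty).modify
                  ((PySem.Dict.mk r).getD "Animal_Type" "") PySem.Set.empty
                  (fun s => PySem.Set.add s ((PySem.Dict.mk r).getD "Sub_Type" "")) := by
            by_cases hc : m.contains ((PySem.Dict.mk r).getD "Animal_Type" "") = true <;>
              simp [pvStepA, hb, hs, hc]
          have hgd : (pvStepA m r).getD a PySem.Set.empty
              = PySem.Set.add (m.getD a PySem.Set.empty) ((PySem.Dict.mk r).getD "Sub_Type" "") := by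
            rw [hstep, ← hba, PySem.Dict.getD_modify_self, hm1]
          rw [hgd, hsubs, pvUpdate_cons]
      · have hne : a ≠ (PySem.Dict.mk r).getD "Animal_Type" "" := fun h => hba h.symm
        have hgd : (pvStepA m r).getD a PySem.Set.empty = m.getD a PySem.Set.empty := by
          by_cases hc : m.contains ((PySem.Dict.mk r).getD "Animal_Type" "") = true <;>
            by_cases hs : (PySem.Dict.mk r).getD "Sub_Type" "" = "" <;>
              simp [pvStepA, hb, hc, hs, PySem.Dict.getD_modify_of_ne _ _ _ hne,
                PySem.Dict.getD_insert_of_ne _ _ _ hne]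
        have hsubs : pvSubs (r :: rs) a = pvSubs rs a := by
          simp [pvSubs, pvPair, hba]
        rw [hgd, hsubs]

lemma pvSecondLoop (f : List String → List String) :
    ∀ (ks : List String) (d : PySem.Dict String (List String)), ks.Nodup →
    (∀ k ∈ ks, d.contains k = true) →
    (ks.foldl (fun d key => d.insert key (f (d.getD key PySem.Set.empty))) d).items
      = d.items.map (fun p => if p.1 ∈ ks then (p.1, f (d.getD p.1 PySem.Set.empty)) else p) := by
  intro ks
  induction ks with
  | nil => intro d _ _; simp
  | cons k ks ih =>
    intro d hnd hcont
    have hk : d.contains k = true := hcont k (by simp)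
    have hknotin : k ∉ ks := (List.nodup_cons.mp hnd).1
    rw [List.foldl_cons,
      ih (d.insert k (f (d.getD k PySem.Set.empty))) (List.nodup_cons.mp hnd).2
        (by intro k' hk'; rw [PySem.Dict.contains_insert]
            simp [hcont k' (by simp [hk'])]),
      PySem.Dict.items_insert_of_contains _ _ hk, List.map_map]
    apply List.map_congr_left
    intro p _
    by_cases hpk : p.1 = k
    · have hbeq : (p.1 == k) = true := by simp [hpk]
      simp only [Function.comp_apply, hbeq, if_true, List.mem_cons]
      rw [if_neg (by simpa using hknotin), if_pos (Or.inl hpk), hpk]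
    · have hbeq : (p.1 == k) = false := by simp [hpk]
      simp only [Function.comp_apply, hbeq, Bool.false_eq_true, if_false, List.mem_cons]
      by_cases hpks : p.1 ∈ ks
      · rw [if_pos hpks, if_pos (Or.inr hpks), PySem.Dict.getD_insert_of_ne _ _ _ hpk]
      · rw [if_neg hpks, if_neg (by rintro (h | h) <;> [exact hpk h; exact hpks h])]

lemma pvMem_pvTypes_ne_empty {records : List (List (String × String))} {a : String}
    (h : a ∈ pvTypes records) : a ≠ "" := by
  simp only [pvTypes, List.mem_map, List.mem_filter] at h
  obtain ⟨p, ⟨_, hp⟩, rfl⟩ := h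
  simpa using hp

-- ===== VERDICT (by name: the statement is the Claim_ definition above) =====
theorem extract_all_animal_subtypes_from_dataset_spec : Claim_equal_extract_all_animal_subtypes_from_dataset := by
  intro records _
  unfold Spec_extract_all_animal_subtypes_from_dataset
  have hB : extract_all_animal_subtypes_from_dataset_alt records
      = (PySem.List.dedup (pvTypes records)).map (fun a =>
          (a, PySem.List.sorted (PySem.Set.ofList (pvSubs records a)) (fun x => x) false)) := rfl
  have hfoldkeys : (records.foldl pvStepA PySem.Dict.empty).keys = PySem.Set.ofList (pvTypes records) := by
    rw [pvKeys_foldA, PySem.Dict.keys_empty, PySem.Set.update_nil_left]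
  have hnd : (records.foldl pvStepA PySem.Dict.empty).keys.Nodup := by
    rw [hfoldkeys]; exact PySem.Set.nodup_ofList _
  have hcont : ∀ k ∈ (records.foldl pvStepA PySem.Dict.empty).keys,
      (records.foldl pvStepA PySem.Dict.empty).contains k = true := by
    intro k hk; exact (PySem.Dict.contains_iff_mem_keys _ _).mpr hk
  have hA : extract_all_animal_subtypes_from_dataset records
      = (records.foldl pvStepA PySem.Dict.empty).items.map (fun p =>
          if p.1 ∈ (records.foldl pvStepA PySem.Dict.empty).keys then
            (p.1, PySem.List.sorted ((records.foldl pvStepA PySem.Dict.empty).getD p.1 PySem.Set.empty) (fun x => x) false)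
          else p) :=
    pvSecondLoop (fun s => PySem.List.sorted s (fun x => x) false)
      (records.foldl pvStepA PySem.Dict.empty).keys (records.foldl pvStepA PySem.Dict.empty) hnd hcont
  rw [hA, hB,
    PySem.Dict.items_eq_map_keys (records.foldl pvStepA PySem.Dict.empty) hnd PySem.Set.empty,
    List.map_map,
    PySem.List.dedup_eq_ofList (pvTypes records), ← hfoldkeys]
  apply List.map_congr_left
  intro k hk
  have hkne : k ≠ "" := pvMem_pvTypes_ne_empty (by
    rw [hfoldkeys] at hk
    exact (PySem.Set.mem_ofList _ _).mp hk)
  have hgd : (records.foldl pvStepA PySem.Dict.empty).getD k PySem.Set.empty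
      = PySem.Set.ofList (pvSubs records k) := by
    rw [pvGetD_foldA _ _ _ hkne, PySem.Dict.getD_empty]
    exact PySem.Set.update_nil_left _
  simp only [Function.comp_apply]
  rw [if_pos hk, hgd]
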